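-- pv_equiv track=rewrite | github.com/Diver202/CSES-marathon | AD - Collecting numbers.py | solve
-- ===== SOURCE A (Python) =====
-- def solve(arr, N):
--     # Variable to store the final answer
--     ans = 1
--
--     # Array to store the index of numbers from 1 to N
--     indices = [0] * (N + 1)
--
--     # Store the index of all elements of arr[]
--     for i in range(N):
--         indices[arr[i]] = i
--
--     # If num occurs after (num + 1), increment ans by 1
--     for num in range(1, N):
--         if indices[num + 1] < indices[num]:
--             ans += 1
--     return ans
-- ===== SOURCE B (Python) =====
-- def solve(arr, N):
--     # Backward scan: a value x (at its last occurrence, index >= 1) contributes a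
--     # round break exactly when x+1 is not collected later in the array.
--     ans = 1
--     seen = set()
--     for i in range(N - 1, 0, -1):
--         x = arr[i]
--         if x not in seen:
--             if 1 <= x <= N - 1 and (x + 1) not in seen:
--                 ans += 1
--             seen.add(x)
--     return ans
-- ===== Notes on version B (the rewrite author's own statement) =====
-- stated objective: alternative
-- what changed: Replaces A's two forward loops (build a value-indexed last-position array, then count descents over consecutive values) by a single backward scan over the array that maintains a set of already-collected values and counts a round break at each value whose successor is not collected later.
-- outside the precondition, e.g. on solve([2, -2], 2): A returns 2, B returns 1
import Mathlib
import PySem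

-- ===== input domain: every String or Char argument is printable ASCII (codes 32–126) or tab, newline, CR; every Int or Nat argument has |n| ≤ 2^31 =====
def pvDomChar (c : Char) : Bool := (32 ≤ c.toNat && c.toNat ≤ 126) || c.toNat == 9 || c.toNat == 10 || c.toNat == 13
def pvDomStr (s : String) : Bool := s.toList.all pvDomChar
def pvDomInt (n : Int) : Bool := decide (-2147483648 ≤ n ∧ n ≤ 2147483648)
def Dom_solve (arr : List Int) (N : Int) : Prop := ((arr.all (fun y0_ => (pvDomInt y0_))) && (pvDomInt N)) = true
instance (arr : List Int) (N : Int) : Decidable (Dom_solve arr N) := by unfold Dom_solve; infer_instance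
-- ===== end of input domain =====

-- B replaces A's two forward loops (value-indexed last-position array, then a
-- value-ordered descent count) by one backward scan keeping a set of values already
-- collected later in the array (objective: alternative, same cost).

-- ===== PORT A =====
def solve (arr : List Int) (N : Int) : Int :=
  let indices0 : List Int := List.replicate (N + 1).toNat 0
  let indices := (PySem.List.pyRange 0 N 1).foldl
    (fun ind i => PySem.List.pySetD ind (PySem.List.pyGetD arr i 0) i) indices0
  (PySem.List.pyRange 1 N 1).foldl
    (fun ans num =>
      if PySem.List.pyGetD indices (num + 1) 0 < PySem.List.pyGetD indices num 0
      then ans + 1 else ans) 1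

-- ===== PORT B =====
def solve_alt (arr : List Int) (N : Int) : Int :=
  let st := (PySem.List.pyRange (N - 1) 0 (-1)).foldl
    (fun (st : PySem.Set Int × Int) i =>
      let x := PySem.List.pyGetD arr i 0
      if x ∈ st.1 then st
      else if 1 ≤ x ∧ x ≤ N - 1 ∧ (x + 1) ∉ st.1
      then (PySem.Set.add st.1 x, st.2 + 1)
      else (PySem.Set.add st.1 x, st.2))
    (PySem.Set.empty, (1 : Int))
  st.2

-- ===== PRECONDITION & SPEC =====
-- Pre_ excludes inputs where A raises (N > len(arr), or a value > N among the first N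
-- elements) and first-N values that are negative, where A's returned value comes from
-- Python's accidental end-relative index wraparound into other values' slots.
def Pre_solve (arr : List Int) (N : Int) : Prop :=
  N ≤ arr.length ∧ ∀ x ∈ arr.take N.toNat, 0 ≤ x ∧ x ≤ N
instance (arr : List Int) (N : Int) : Decidable (Pre_solve arr N) := by
  unfold Pre_solve; infer_instance
def pvWitness_solve : List Int × Int := ([2, 1, 3], 3)

def Spec_solve (arr : List Int) (N : Int) (out : Int) : Prop := out = solve_alt arr N
instance (arr : List Int) (N : Int) (out : Int) : Decidable (Spec_solve arr N out) := by
  unfold Spec_solve; infer_instance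

-- ===== CLAIM (what is proved, stated in full; the proofs are below) =====
def Claim_equal_solve : Prop := ∀ (arr : List Int) (N : Int),
  Dom_solve arr N → Pre_solve arr N → Spec_solve arr N (solve arr N)

-- ===== LEMMAS AND PROOFS =====

-- `pvF arr k` is arr[k]; `pvInd arr m u` is A's indices[u] after the first m writes
-- (the last index < m holding u, else 0); `pvOcc arr n i u` says u occurs at some
-- index in [i, n).
def pvF (arr : List Int) (k : Nat) : Int := arr.getD k 0
def pvInd (arr : List Int) (m : Nat) (u : Int) : Nat :=
  (List.range m).foldl (fun a i => if pvF arr i = u then i else a) 0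
abbrev pvOcc (arr : List Int) (n i : Nat) (u : Int) : Prop :=
  ∃ j ∈ List.range n, i ≤ j ∧ pvF arr j = u
-- `pvQ arr n i t`: value t+1 (for t < n-1) is a round break already discovered after
-- the backward scan has processed indices ≥ i.
abbrev pvQ (arr : List Int) (n i t : Nat) : Prop :=
  pvInd arr n ((t : Int) + 2) < pvInd arr n ((t : Int) + 1) ∧
    i ≤ pvInd arr n ((t : Int) + 1) ∧ pvOcc arr n i ((t : Int) + 1)

-- State of A's index-building loop after m steps, and of B's backward loop after m
-- steps (B's step k touches index n-1-k).
def pvIndA (arr : List Int) (n m : Nat) : List Int :=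
  (List.range m).foldl
    (fun ind (k : Nat) => PySem.List.pySetD ind (PySem.List.pyGetD arr (k : Int) 0) (k : Int))
    (List.replicate (n + 1) (0 : Int))
def pvStB (arr : List Int) (n m : Nat) : PySem.Set Int × Int :=
  (List.range m).foldl
    (fun (st : PySem.Set Int × Int) (k : Nat) =>
      let x := pvF arr (n - 1 - k)
      if x ∈ st.1 then st
      else if 1 ≤ x ∧ x ≤ (n : Int) - 1 ∧ (x + 1) ∉ st.1
      then (PySem.Set.add st.1 x, st.2 + 1)
      else (PySem.Set.add st.1 x, st.2))
    (PySem.Set.empty, (1 : Int))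

theorem pvIndA_succ (arr : List Int) (n m : Nat) :
    pvIndA arr n (m + 1)
      = PySem.List.pySetD (pvIndA arr n m) (PySem.List.pyGetD arr (m : Int) 0) (m : Int) := by
  simp [pvIndA, List.range_succ]

theorem pvStB_succ (arr : List Int) (n m : Nat) :
    pvStB arr n (m + 1)
      = (let x := pvF arr (n - 1 - m)
         if x ∈ (pvStB arr n m).1 then pvStB arr n m
         else if 1 ≤ x ∧ x ≤ (n : Int) - 1 ∧ (x + 1) ∉ (pvStB arr n m).1
         then (PySem.Set.add (pvStB arr n m).1 x, (pvStB arr n m).2 + 1)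
         else (PySem.Set.add (pvStB arr n m).1 x, (pvStB arr n m).2)) := by
  simp only [pvStB, List.range_succ, List.foldl_append, List.foldl_cons, List.foldl_nil]

theorem pvInd_succ (arr : List Int) (m : Nat) (u : Int) :
    pvInd arr (m + 1) u = if pvF arr m = u then m else pvInd arr m u := by
  simp [pvInd, List.range_succ]

theorem pvInd_spec (arr : List Int) (m : Nat) (u : Int) :
    pvInd arr m u = 0 ∨ (pvInd arr m u < m ∧ pvF arr (pvInd arr m u) = u) := by
  induction m with
  | zero => left; rfl
  | succ m ih =>
    rw [pvInd_succ]
    by_cases hc : pvF arr m = u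
    · rw [if_pos hc]; right; exact ⟨by omega, hc⟩
    · rw [if_neg hc]
      rcases ih with h | ⟨h1, h2⟩
      · left; exact h
      · right; exact ⟨by omega, h2⟩

theorem pvInd_ge (arr : List Int) (m : Nat) (u : Int) :
    ∀ j, j < m → pvF arr j = u → j ≤ pvInd arr m u := by
  induction m with
  | zero => intro j hj _; omega
  | succ m ih =>
    intro j hj hf
    rw [pvInd_succ]
    by_cases hc : pvF arr m = u
    · rw [if_pos hc]; omega
    · rw [if_neg hc]
      have hjm : j < m := by
        rcases Nat.lt_succ_iff_lt_or_eq.mp hj with h | h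
        · exact h
        · exact absurd (h ▸ hf) hc
      exact ih j hjm hf

theorem pv_occ_ind {arr : List Int} {n i : Nat} {u : Int} (h : pvOcc arr n i u) :
    i ≤ pvInd arr n u := by
  obtain ⟨j, hj, hij, hf⟩ := h
  have := pvInd_ge arr n u j (by simpa using hj) hf
  omega

theorem pv_not_occ_lt {arr : List Int} {n i : Nat} {u : Int} (hi : 1 ≤ i)
    (h : ¬ pvOcc arr n i u) : pvInd arr n u < i := by
  rcases pvInd_spec arr n u with h0 | ⟨h1, h2⟩
  · omega
  · by_contra hge
    exact h ⟨pvInd arr n u, by simpa using h1, by omega, h2⟩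

theorem pv_occ_split {arr : List Int} {n i : Nat} {u : Int} (hin : i < n) :
    pvOcc arr n i u ↔ pvOcc arr n (i + 1) u ∨ pvF arr i = u := by
  constructor
  · rintro ⟨j, hj, hij, hf⟩
    by_cases hji : j = i
    · right; exact hji ▸ hf
    · left; exact ⟨j, hj, by omega, hf⟩
  · rintro (⟨j, hj, hij, hf⟩ | hf)
    · exact ⟨j, hj, by omega, hf⟩
    · exact ⟨i, by simpa using hin, le_refl i, hf⟩

-- countP changes by one when the predicates agree except at a single element where
-- p holds and q does not.
theorem pv_countP_diff {l : List Nat} (hnd : l.Nodup) {p q : Nat → Bool} {t0 : Nat}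
    (ht0 : t0 ∈ l) (hp : p t0 = true) (hq : q t0 = false)
    (hagree : ∀ t ∈ l, t ≠ t0 → p t = q t) : l.countP p = l.countP q + 1 := by
  have hperm := List.perm_cons_erase ht0
  rw [hperm.countP_eq p, hperm.countP_eq q, List.countP_cons, List.countP_cons, hp, hq]
  have heq : (l.erase t0).countP p = (l.erase t0).countP q := by
    apply List.countP_congr
    intro t ht
    have h1 : t ∈ l := List.mem_of_mem_erase ht
    have h2 : t ≠ t0 := by
      intro hE
      exact (hnd.not_mem_erase (a := t0)) (hE ▸ ht)
    rw [hagree t h1 h2]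
  rw [heq]
  simp

-- Invariant of A's index-building loop: the slot of each value u holds pvInd.
theorem pv_indA_inv (arr : List Int) (n : Nat)
    (hval : ∀ k, k < n → 0 ≤ pvF arr k ∧ pvF arr k ≤ (n : Int)) :
    ∀ m, m ≤ n → (pvIndA arr n m).length = n + 1 ∧
      ∀ u : Int, 0 ≤ u → u ≤ (n : Int) →
        (pvIndA arr n m).getD u.toNat 0 = (pvInd arr m u : Int) := by
  intro m
  induction m with
  | zero =>
    intro _
    refine ⟨by simp [pvIndA], ?_⟩
    intro u h1 h2
    have : pvInd arr 0 u = 0 := rfl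
    rw [this]
    simp [pvIndA, List.getD_eq_getElem?_getD, List.getElem?_replicate]
    split <;> rfl
  | succ m ih =>
    intro hm
    obtain ⟨ihl, ihg⟩ := ih (Nat.le_of_succ_le hm)
    have hmn : m < n := hm
    obtain ⟨hx1, hx2⟩ := hval m hmn
    have hxF : PySem.List.pyGetD arr (m : Int) 0 = pvF arr m := by
      simp [PySem.List.pyGetD_natCast, pvF]
    rw [pvIndA_succ, hxF, PySem.List.pySetD_of_nonneg _ _ hx1]
    constructor
    · rw [List.length_set]; exact ihl
    · intro u h1 h2
      rw [List.getD_eq_getElem?_getD, List.getElem?_set, pvInd_succ]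
      by_cases hvx : pvF arr m = u
      · have ht : (pvF arr m).toNat = u.toNat := by omega
        rw [if_pos ht,
          if_pos (show (pvF arr m).toNat < (pvIndA arr n m).length by rw [ihl]; omega),
          if_pos hvx]
        rfl
      · have ht : ¬ (pvF arr m).toNat = u.toNat := by omega
        rw [if_neg ht, if_neg hvx, ← List.getD_eq_getElem?_getD, ihg u h1 h2]

-- The backward-scan transition for a value other than the one just uncovered.
theorem pvQ_step_ne {arr : List Int} {n i : Nat} (hin : i < n) {t : Nat}
    (hne : (t : Int) + 1 ≠ pvF arr i) : (pvQ arr n i t ↔ pvQ arr n (i + 1) t) := by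
  have hocc : pvOcc arr n i ((t : Int) + 1) ↔ pvOcc arr n (i + 1) ((t : Int) + 1) := by
    rw [pv_occ_split hin]
    constructor
    · rintro (h | h)
      · exact h
      · exact absurd h.symm hne
    · exact Or.inl
  constructor
  · rintro ⟨d, _, ho⟩
    have ho' := hocc.mp ho
    exact ⟨d, pv_occ_ind ho', ho'⟩
  · rintro ⟨d, hmid, ho⟩
    exact ⟨d, by omega, hocc.mpr ho⟩

-- Weakening an occurrence bound by one.
theorem pv_occ_weaken {arr : List Int} {n i : Nat} {u : Int}
    (h : pvOcc arr n (i + 1) u) : pvOcc arr n i u := by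
  obtain ⟨j, hj, hij, hf⟩ := h
  exact ⟨j, hj, by omega, hf⟩

-- Invariant of B's backward loop: after m steps (indices ≥ n-m processed) the set
-- holds exactly the values occurring at an index ≥ n-m, and the counter is 1 plus
-- the number of already-discovered round breaks.
theorem pv_stB_inv (arr : List Int) (n : Nat) (hn1 : 1 ≤ n)
    (hval : ∀ k, k < n → 0 ≤ pvF arr k ∧ pvF arr k ≤ (n : Int)) :
    ∀ m, m ≤ n - 1 →
      (∀ u : Int, u ∈ (pvStB arr n m).1 ↔ pvOcc arr n (n - m) u) ∧
      (pvStB arr n m).2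
        = 1 + ((List.range (n - 1)).countP (fun t => decide (pvQ arr n (n - m) t)) : Int) := by
  intro m
  induction m with
  | zero =>
    intro _
    constructor
    · intro u
      simp only [pvStB, PySem.Set.empty]
      constructor
      · intro hu; exact absurd hu (List.not_mem_nil)
      · rintro ⟨j, hj, hij, _⟩
        simp only [List.mem_range] at hj
        omega
    · have hz : (List.range (n - 1)).countP (fun t => decide (pvQ arr n (n - 0) t)) = 0 := by
        rw [List.countP_eq_zero]
        intro t _
        simp only [decide_eq_true_eq]
        rintro ⟨_, _, j, hj, hij, _⟩
        simp only [List.mem_range] at hj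
        omega
      rw [hz]
      rfl
  | succ m ih =>
    intro hm
    obtain ⟨iha, ihb⟩ := ih (by omega)
    have hi1 : 1 ≤ n - 1 - m := by omega
    have hin : n - 1 - m < n := by omega
    have e1 : n - m = (n - 1 - m) + 1 := by omega
    have e2 : n - (m + 1) = n - 1 - m := by omega
    rw [e1] at iha ihb
    obtain ⟨hx1, hx2⟩ := hval (n - 1 - m) hin
    rw [pvStB_succ, e2]
    by_cases hmem : pvF arr (n - 1 - m) ∈ (pvStB arr n m).1
    · rw [if_pos hmem]
      have hoccx : pvOcc arr n (n - 1 - m + 1) (pvF arr (n - 1 - m)) := (iha _).mp hmem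
      constructor
      · intro u
        rw [iha u]
        constructor
        · exact pv_occ_weaken
        · intro h
          rcases (pv_occ_split hin).mp h with h' | hfu
          · exact h'
          · exact hfu ▸ hoccx
      · rw [ihb]
        have hc : ∀ t ∈ List.range (n - 1),
            decide (pvQ arr n (n - 1 - m + 1) t) = true
              ↔ decide (pvQ arr n (n - 1 - m) t) = true := by
          intro t _
          simp only [decide_eq_true_eq]
          by_cases hu : (t : Int) + 1 = pvF arr (n - 1 - m)
          · have hoccx' : pvOcc arr n (n - 1 - m + 1) ((t : Int) + 1) := hu ▸ hoccx
            constructor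
            · rintro ⟨d, _, _⟩
              exact ⟨d, by have := pv_occ_ind hoccx'; omega, pv_occ_weaken hoccx'⟩
            · rintro ⟨d, _, _⟩
              exact ⟨d, pv_occ_ind hoccx', hoccx'⟩
          · exact (pvQ_step_ne hin hu).symm
        rw [List.countP_congr hc]
    · rw [if_neg hmem]
      have hnoccx : ¬ pvOcc arr n (n - 1 - m + 1) (pvF arr (n - 1 - m)) :=
        fun h => hmem ((iha _).mpr h)
      have hIndx : pvInd arr n (pvF arr (n - 1 - m)) = n - 1 - m := by
        have hge := pvInd_ge arr n (pvF arr (n - 1 - m)) (n - 1 - m) hin rfl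
        have hlt := pv_not_occ_lt (by omega) hnoccx
        omega
      have hmemNew : ∀ u : Int,
          u ∈ PySem.Set.add (pvStB arr n m).1 (pvF arr (n - 1 - m)) ↔
            pvOcc arr n (n - 1 - m) u := by
        intro u
        rw [PySem.Set.mem_add, iha u, pv_occ_split hin]
        constructor
        · rintro (h | h)
          · exact Or.inl h
          · exact Or.inr h.symm
        · rintro (h | h)
          · exact Or.inl h
          · exact Or.inr h.symm
      by_cases hc : 1 ≤ pvF arr (n - 1 - m) ∧ pvF arr (n - 1 - m) ≤ (n : Int) - 1 ∧
          (pvF arr (n - 1 - m) + 1) ∉ (pvStB arr n m).1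
      · rw [if_pos hc]
        obtain ⟨hcx1, hcx2, hcxs⟩ := hc
        refine ⟨hmemNew, ?_⟩
        have hnocc1 : ¬ pvOcc arr n (n - 1 - m) (pvF arr (n - 1 - m) + 1) := by
          rintro ⟨j, hj, hij, hf⟩
          simp only [List.mem_range] at hj
          by_cases hji : j = n - 1 - m
          · rw [hji] at hf; omega
          · exact hcxs ((iha _).mpr ⟨j, by simpa using hj, by omega, hf⟩)
        have hdlt : pvInd arr n (pvF arr (n - 1 - m) + 1) < n - 1 - m :=
          pv_not_occ_lt hi1 hnocc1
        have ht0x : ((pvF arr (n - 1 - m) - 1).toNat : Int) + 1 = pvF arr (n - 1 - m) := by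
          omega
        have ht0x2 : ((pvF arr (n - 1 - m) - 1).toNat : Int) + 2
            = pvF arr (n - 1 - m) + 1 := by omega
        have ht0mem : (pvF arr (n - 1 - m) - 1).toNat ∈ List.range (n - 1) := by
          simp only [List.mem_range]
          omega
        have hdiff : (List.range (n - 1)).countP (fun t => decide (pvQ arr n (n - 1 - m) t))
            = (List.range (n - 1)).countP (fun t => decide (pvQ arr n (n - 1 - m + 1) t)) + 1 := by
          apply pv_countP_diff (List.nodup_range) ht0mem
          · simp only [decide_eq_true_eq]
            refine ⟨?_, ?_, ?_⟩
            · rw [ht0x, ht0x2, hIndx]; exact hdlt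
            · rw [ht0x, hIndx]
            · rw [ht0x]
              exact ⟨n - 1 - m, by simpa using hin, le_refl _, rfl⟩
          · simp only [decide_eq_false_iff_not]
            rintro ⟨_, _, ho⟩
            rw [ht0x] at ho
            exact hnoccx ho
          · intro t _ hne
            apply decide_eq_decide.mpr
            apply pvQ_step_ne hin
            intro hE
            exact hne (by omega)
        rw [ihb, hdiff]
        push_cast
        ring
      · rw [if_neg hc]
        refine ⟨hmemNew, ?_⟩
        rw [ihb]
        have hcong : ∀ t ∈ List.range (n - 1),
            decide (pvQ arr n (n - 1 - m + 1) t) = true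
              ↔ decide (pvQ arr n (n - 1 - m) t) = true := by
          intro t ht
          simp only [List.mem_range] at ht
          simp only [decide_eq_true_eq]
          by_cases hu : (t : Int) + 1 = pvF arr (n - 1 - m)
          · have hxS : (pvF arr (n - 1 - m) + 1) ∈ (pvStB arr n m).1 := by
              by_contra hxs
              exact hc ⟨by omega, by omega, hxs⟩
            have hind1 : n - 1 - m + 1 ≤ pvInd arr n (pvF arr (n - 1 - m) + 1) :=
              pv_occ_ind ((iha _).mp hxS)
            constructor
            · rintro ⟨_, _, ho⟩
              exact absurd (hu ▸ ho) hnoccx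
            · rintro ⟨d, _, _⟩
              rw [show ((t : Int) + 2) = pvF arr (n - 1 - m) + 1 from by omega, hu, hIndx] at d
              omega
          · exact (pvQ_step_ne hin hu).symm
        rw [List.countP_congr hcong]

theorem solve_main : ∀ (arr : List Int) (N : Int),
    Pre_solve arr N → solve arr N = solve_alt arr N := by
  intro arr N hpre
  obtain ⟨hlen, hvals⟩ := hpre
  by_cases hN0 : N ≤ 0
  · have z1 := PySem.List.pyRange_one_eq_nil (a := 0) (b := N) (by omega)
    have z2 := PySem.List.pyRange_one_eq_nil (a := 1) (b := N) (by omega)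
    have z3 := PySem.List.pyRange_neg_one_eq_nil (a := N - 1) (b := 0) (by omega)
    simp [solve, solve_alt, z1, z2, z3]
  · obtain ⟨n, rfl⟩ := Int.eq_ofNat_of_zero_le (by omega : (0:Int) ≤ N)
    have hn1 : 1 ≤ n := by omega
    have hlen' : n ≤ arr.length := by exact_mod_cast hlen
    have hval : ∀ k, k < n → 0 ≤ pvF arr k ∧ pvF arr k ≤ (n : Int) := by
      intro k hk
      have hk' : k < arr.length := by omega
      have hfk : pvF arr k = (arr.take n)[k]'(by simp; omega) := by
        rw [List.getElem_take, pvF, List.getD_eq_getElem?_getD,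
          List.getElem?_eq_getElem hk']
        rfl
      have := hvals ((arr.take n)[k]'(by simp; omega)) (by
        apply List.getElem_mem)
      rw [← hfk] at this
      simpa using this
    have e2 : ((n : Int) + 1).toNat = n + 1 := by omega
    have e3 : ((n : Int) - 1).toNat = n - 1 := by omega
    obtain ⟨hlenA, hgetA⟩ := pv_indA_inv arr n hval n (le_refl n)
    -- A's result in terms of pvIndA
    have hA : solve arr (n : Int)
        = (List.range (n - 1)).foldl
            (fun (ans : Int) (k : Nat) =>
              if PySem.List.pyGetD (pvIndA arr n n) ((1 : Int) + (k : Int) + 1) 0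
                  < PySem.List.pyGetD (pvIndA arr n n) ((1 : Int) + (k : Int)) 0
              then ans + 1 else ans) 1 := by
      simp only [solve, PySem.List.pyRange_one, sub_zero, Int.toNat_natCast, e2, e3,
        List.foldl_map, zero_add, pvIndA]
      rfl
    -- rewrite A's index reads through the invariant
    have hRead : ∀ u : Int, 0 ≤ u → u ≤ (n : Int) →
        PySem.List.pyGetD (pvIndA arr n n) u 0 = (pvInd arr n u : Int) := by
      intro u h1 h2
      rw [PySem.List.pyGetD_of_nonneg _ _ h1, hgetA u h1 h2]
    have hA2 : solve arr (n : Int)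
        = 1 + ((List.range (n - 1)).countP
            (fun k : Nat => decide (pvInd arr n ((k : Int) + 2) < pvInd arr n ((k : Int) + 1))) : Int) := by
      rw [hA]
      calc (List.range (n - 1)).foldl
            (fun (ans : Int) (k : Nat) =>
              if PySem.List.pyGetD (pvIndA arr n n) ((1 : Int) + (k : Int) + 1) 0
                  < PySem.List.pyGetD (pvIndA arr n n) ((1 : Int) + (k : Int)) 0
              then ans + 1 else ans) 1
          = (List.range (n - 1)).foldl
            (fun (ans : Int) (k : Nat) =>
              if (fun k : Nat => decide (pvInd arr n ((k : Int) + 2) < pvInd arr n ((k : Int) + 1))) k = true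
              then ans + 1 else ans) 1 := by
            apply List.foldl_ext
            intro acc k hk
            have hkn : k < n - 1 := by simpa using hk
            have ea : (1 : Int) + (k : Int) + 1 = (k : Int) + 2 := by ring
            have eb : (1 : Int) + (k : Int) = (k : Int) + 1 := by ring
            rw [ea, eb, hRead _ (by omega) (by omega), hRead _ (by omega) (by omega)]
            by_cases hcnd : pvInd arr n ((k : Int) + 2) < pvInd arr n ((k : Int) + 1)
            · rw [if_pos (by exact_mod_cast hcnd), if_pos (by simpa using hcnd)]
            · rw [if_neg (by exact_mod_cast hcnd), if_neg (by simpa using hcnd)]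
        _ = 1 + ((List.range (n - 1)).countP
            (fun k : Nat => decide (pvInd arr n ((k : Int) + 2) < pvInd arr n ((k : Int) + 1))) : Int) :=
            PySem.List.foldl_count_if _ _ 1
    -- B's result in terms of pvStB
    have hB : solve_alt arr (n : Int) = (pvStB arr n (n - 1)).2 := by
      simp only [solve_alt, PySem.List.pyRange_neg_one, sub_zero, e3, List.foldl_map]
      refine congrArg Prod.snd ?_
      rw [pvStB]
      apply List.foldl_ext
      intro st k hk
      have hkn : k < n - 1 := by simpa using hk
      have ei : (n : Int) - 1 - (k : Int) = ((n - 1 - k : Nat) : Int) := by omega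
      rw [ei, PySem.List.pyGetD_natCast]
      rfl
    obtain ⟨_, hansB⟩ := pv_stB_inv arr n hn1 hval (n - 1) (le_refl _)
    rw [show n - (n - 1) = 1 from by omega] at hansB
    rw [hA2, hB, hansB]
    have hcong : ∀ t ∈ List.range (n - 1),
        decide (pvQ arr n 1 t) = true
          ↔ (fun k : Nat => decide (pvInd arr n ((k : Int) + 2) < pvInd arr n ((k : Int) + 1))) t = true := by
      intro t _
      simp only [decide_eq_true_eq]
      constructor
      · rintro ⟨d, _, _⟩; exact d
      · intro d
        rcases pvInd_spec arr n ((t : Int) + 1) with h0 | ⟨hlt, hf⟩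
        · omega
        · exact ⟨d, by omega, ⟨pvInd arr n ((t : Int) + 1), by simpa using hlt, by omega, hf⟩⟩
    rw [List.countP_congr hcong]

-- ===== VERDICT (by name: the statement is the Claim_ definition above) =====
theorem solve_spec : Claim_equal_solve := by
  intro arr N _ hpre
  exact solve_main arr N hpre
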